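-- pv_equiv track=rewrite | github.com/MineTime23/Algorithm | 프로그래머스/unrated/160586. 대충 만든 자판/대충 만든 자판.py | solution
-- ===== SOURCE A (Python) =====
-- from collections import defaultdict
--
-- def solution(keymap, targets):
--     answer = []
--     data = defaultdict(int)
--     for i in keymap:
--         for j in range(len(i)):
--             if data[i[j]] == 0:
--                 data[i[j]] = j+1
--             else:
--                 if j+1 <= data[i[j]]:
--                     data[i[j]] = j+1
--
--     answer = []
--     for i in targets:
--         a = 0
--         for j in range(len(i)):
--             if data[i[j]] == 0:
--                 a = -1
--                 break
--             else:
--                 a += data[i[j]]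
--         if a == 0:
--             a = -1
--         answer.append(a)
--
--     return answer
-- ===== SOURCE B (Python) =====
-- def solution(keymap, targets):
--     answer = []
--     for t in targets:
--         total = 0
--         for c in t:
--             candidates = [k.index(c) + 1 for k in keymap if c in k]
--             if not candidates:
--                 total = -1
--                 break
--             total += min(candidates)
--         answer.append(total if total > 0 else -1)
--     return answer
-- ===== Notes on version B (the rewrite author's own statement) =====
-- stated objective: alternative
-- what changed: Drops A's precomputed defaultdict of minimal key positions entirely: B scans the keymap per target character, taking min(k.index(c)+1) over keymaps containing c, with a single positivity test replacing A's zero-sentinel bookkeeping.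
import Mathlib
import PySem

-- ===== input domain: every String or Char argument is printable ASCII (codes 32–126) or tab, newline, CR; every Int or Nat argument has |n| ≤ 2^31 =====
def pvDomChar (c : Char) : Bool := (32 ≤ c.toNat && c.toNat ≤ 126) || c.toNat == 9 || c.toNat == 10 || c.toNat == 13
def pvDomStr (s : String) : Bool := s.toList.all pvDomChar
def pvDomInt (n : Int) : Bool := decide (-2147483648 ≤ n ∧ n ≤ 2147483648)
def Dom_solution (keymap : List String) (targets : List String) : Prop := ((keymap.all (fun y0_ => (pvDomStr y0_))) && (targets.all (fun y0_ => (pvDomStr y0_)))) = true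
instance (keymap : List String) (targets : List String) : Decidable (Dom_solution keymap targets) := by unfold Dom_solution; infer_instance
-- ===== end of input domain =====

-- B replaces A's precomputed min-position dict by a direct per-target-character scan of the keymap (alternative decomposition, same results).

-- ===== PORT A =====
-- A's dict update for one (index, char) pair; dict reads are getD · 0 (defaultdict(int)).
def solAStep (d : PySem.Dict Char Int) (jc : Int × Char) : PySem.Dict Char Int :=
  if d.getD jc.2 0 = 0 then d.insert jc.2 (jc.1 + 1)
  else if jc.1 + 1 ≤ d.getD jc.2 0 then d.insert jc.2 (jc.1 + 1) else d

-- A's first double loop: for i in keymap: for j in range(len(i)): update data with (j, i[j]).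
def solABuild (keymap : List String) : PySem.Dict Char Int :=
  keymap.foldl (fun d i =>
    (PySem.List.pyRange 0 (PySem.Str.len i) 1).foldl
      (fun d j => solAStep d (j, PySem.List.pyGetD i.toList j ' ')) d)
    PySem.Dict.empty

-- A's per-target loop with break: for j in range(len(i)): if data[i[j]] == 0: a=-1; break else a += data[i[j]].
def solALoop (data : PySem.Dict Char Int) (i : List Char) : List Int → Int → Int
  | [], a => a
  | j :: js, a =>
    let c := PySem.List.pyGetD i j ' '
    if data.getD c 0 = 0 then -1
    else solALoop data i js (a + data.getD c 0)

def solution (keymap : List String) (targets : List String) : List Int :=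
  let data := solABuild keymap
  targets.foldl (fun answer i =>
    let a := solALoop data i.toList (PySem.List.pyRange 0 (PySem.Str.len i) 1) 0
    answer ++ [if a = 0 then -1 else a]) []

-- ===== PORT B =====
-- [k.index(c) + 1 for k in keymap if c in k]
def solBCand (keymap : List String) (c : Char) : List Int :=
  (keymap.filter (fun k => k.toList.contains c)).map
    (fun k => (((PySem.List.index? k.toList c).getD 0 : Nat) : Int) + 1)

-- for c in t: candidates = …; if not candidates: total = -1; break; total += min(candidates)
def solBLoop (keymap : List String) : List Char → Int → Int
  | [], total => total
  | c :: cs, total =>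
    let candidates := solBCand keymap c
    match PySem.List.min? candidates (fun x => x) with
    | none => -1
    | some m => solBLoop keymap cs (total + m)

def solution_alt (keymap : List String) (targets : List String) : List Int :=
  targets.foldl (fun answer t =>
    let total := solBLoop keymap t.toList 0
    answer ++ [if total > 0 then total else -1]) []

-- ===== PRECONDITION & SPEC =====
def Spec_solution (keymap : List String) (targets : List String) (out : List Int) : Prop := out = solution_alt keymap targets
instance (keymap : List String) (targets : List String) (out : List Int) : Decidable (Spec_solution keymap targets out) := by unfold Spec_solution; infer_instance

-- ===== CLAIM (what is proved, stated in full; the proofs are below) =====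
def Claim_equal_solution : Prop := ∀ (keymap : List String) (targets : List String), Dom_solution keymap targets → Spec_solution keymap targets (solution keymap targets)

-- ===== LEMMAS AND PROOFS =====

-- min with 0 read as "no occurrence yet" (A's defaultdict sentinel)
def pvMerge (cur v : Int) : Int := if v = 0 then cur else if cur = 0 then v else min cur v

-- position value contributed by one keymap string: first occurrence index + 1, or 0
def pvFirst (k : List Char) (c : Char) : Int :=
  match PySem.List.index? k c with
  | none => 0
  | some i => (i : Int) + 1

def pvG (keymap : List String) (c : Char) : Int :=
  keymap.foldl (fun acc k => pvMerge acc (pvFirst k.toList c)) 0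

-- B's per-character value (0 encodes "no candidate")
def pvB (keymap : List String) (c : Char) : Int :=
  match PySem.List.min? (solBCand keymap c) (fun x => x) with
  | none => 0
  | some m => m

-- A's per-target loop re-expressed over the characters themselves
def solALoopCh (data : PySem.Dict Char Int) : List Char → Int → Int
  | [], a => a
  | c :: rest, a => if data.getD c 0 = 0 then -1 else solALoopCh data rest (a + data.getD c 0)

theorem pvFirst_nonneg (k : List Char) (c : Char) : 0 ≤ pvFirst k c := by
  unfold pvFirst
  rcases PySem.List.index? k c with _ | i
  · simp
  · positivity

theorem pvMerge_nonneg {a b : Int} (h1 : 0 ≤ a) (h2 : 0 ≤ b) : 0 ≤ pvMerge a b := by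
  unfold pvMerge; split_ifs <;> omega

theorem pv_inner (cs : List Char) : ∀ (s0 : Int) (d : PySem.Dict Char Int) (c : Char),
    0 ≤ s0 → 0 ≤ d.getD c 0 →
    ((PySem.List.enumerate cs s0).foldl solAStep d).getD c 0
      = pvMerge (d.getD c 0)
          (match PySem.List.index? cs c with
           | none => 0
           | some i => s0 + (i : Int) + 1) := by
  induction cs with
  | nil =>
    intro s0 d c hs hd
    simp [PySem.List.enumerate_nil, PySem.List.index?_eq_idxOf?, pvMerge]
  | cons c0 rest ih =>
    intro s0 d c hs hd
    rw [PySem.List.enumerate_cons, List.foldl_cons]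
    by_cases hc : c0 = c
    · subst hc
      have hstep : (solAStep d (s0, c0)).getD c0 0 = pvMerge (d.getD c0 0) (s0 + 1) := by
        simp only [solAStep, pvMerge]
        split_ifs with h1 h2 <;> simp [PySem.Dict.getD_insert] <;> omega
      have hnn : 0 ≤ (solAStep d (s0, c0)).getD c0 0 := by
        rw [hstep]; exact pvMerge_nonneg hd (by omega)
      rw [ih (s0+1) _ c0 (by omega) hnn, hstep]
      rw [PySem.List.index?_cons_self]
      rcases h : PySem.List.index? rest c0 with _ | i <;>
        · simp only [h, pvMerge]
          split_ifs <;> omega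
    · have hstep : (solAStep d (s0, c0)).getD c 0 = d.getD c 0 := by
        simp only [solAStep]
        split_ifs <;> simp [PySem.Dict.getD_insert, fun e => hc (Eq.symm e)] <;>
          intro e <;> exact absurd e.symm hc
      rw [ih (s0+1) _ c (by omega) (by rw [hstep]; exact hd), hstep]
      have hidx : PySem.List.index? (c0 :: rest) c = (PySem.List.index? rest c).map (· + 1) :=
        PySem.List.index?_cons_of_ne _ hc
      rw [hidx]
      rcases h : PySem.List.index? rest c with _ | i
      · rfl
      · simp only [Option.map]
        congr 1
        push_cast
        ring

theorem pv_build (keymap : List String) (c : Char) :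
    (solABuild keymap).getD c 0 = pvG keymap c := by
  have hb : (fun (d : PySem.Dict Char Int) (i : String) =>
      (PySem.List.pyRange 0 (PySem.Str.len i) 1).foldl
        (fun d j => solAStep d (j, PySem.List.pyGetD i.toList j ' ')) d)
    = (fun d i => (PySem.List.enumerate i.toList 0).foldl solAStep d) := by
    funext d i
    rw [PySem.List.enumerate_eq_map_pyRange (d := ' '), List.foldl_map, PySem.Str.len_eq]
    simp [PySem.List.len]
  have main : ∀ (l : List String) (d : PySem.Dict Char Int), 0 ≤ d.getD c 0 →
      (l.foldl (fun d i => (PySem.List.enumerate i.toList 0).foldl solAStep d) d).getD c 0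
        = l.foldl (fun acc k => pvMerge acc (pvFirst k.toList c)) (d.getD c 0) := by
    intro l
    induction l with
    | nil => intro d hd; simp
    | cons k rest ih =>
      intro d hd
      simp only [List.foldl_cons]
      have h1 := pv_inner k.toList 0 d c le_rfl hd
      have hfirst : (match PySem.List.index? k.toList c with
           | none => (0 : Int)
           | some i => 0 + (i : Int) + 1) = pvFirst k.toList c := by
        unfold pvFirst
        rcases PySem.List.index? k.toList c with _ | i <;> simp <;> ring
      rw [hfirst] at h1
      rw [ih _ (by rw [h1]; exact pvMerge_nonneg hd (pvFirst_nonneg _ _)), h1]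
  unfold solABuild
  rw [hb, main keymap PySem.Dict.empty (by simp [PySem.Dict.getD_empty])]
  simp [PySem.Dict.getD_empty, pvG]

theorem pv_cand_pos (keymap : List String) (c : Char) :
    ∀ x ∈ solBCand keymap c, 1 ≤ x := by
  intro x hx
  simp only [solBCand, List.mem_map, List.mem_filter] at hx
  obtain ⟨k, _, rfl⟩ := hx
  omega

theorem solBCand_cons (k : String) (rest : List String) (c : Char) :
    solBCand (k :: rest) c
      = (if k.toList.contains c
          then [(((PySem.List.index? k.toList c).getD 0 : Nat) : Int) + 1] else [])
        ++ solBCand rest c := by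
  simp only [solBCand, List.filter_cons]
  split_ifs <;> simp

theorem pv_fold_pos (c : Char) (l : List String) : ∀ (acc : Int), 0 < acc →
    l.foldl (fun acc k => pvMerge acc (pvFirst k.toList c)) acc
      = (solBCand l c).foldl min acc := by
  induction l with
  | nil => intro acc _; simp [solBCand]
  | cons k rest ih =>
    intro acc hacc
    rw [List.foldl_cons, solBCand_cons]
    by_cases hm : k.toList.contains c
    · rcases h : PySem.List.index? k.toList c with _ | i
      · rw [PySem.List.index?_eq_none_iff] at h
        simp at hm
        exact absurd hm h
      · have hf : pvFirst k.toList c = (i : Int) + 1 := by unfold pvFirst; rw [h]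
        have hmv : pvMerge acc ((i : Int) + 1) = min acc ((i : Int) + 1) := by
          unfold pvMerge; split_ifs <;> omega
        rw [hf, hmv, if_pos hm]
        simp only [Option.getD_some, List.singleton_append, List.foldl_cons]
        exact ih _ (by omega)
    · have h : PySem.List.index? k.toList c = none := by
        rw [PySem.List.index?_eq_none_iff]
        simpa using hm
      have hf : pvFirst k.toList c = 0 := by unfold pvFirst; rw [h]
      have hmv : pvMerge acc 0 = acc := by unfold pvMerge; simp
      rw [hf, hmv, if_neg hm, List.nil_append]
      exact ih _ hacc

theorem pv_G_eq_B (keymap : List String) (c : Char) : pvG keymap c = pvB keymap c := by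
  induction keymap with
  | nil => simp [pvG, pvB, solBCand, PySem.List.min?]
  | cons k rest ih =>
    by_cases hm : k.toList.contains c
    · rcases h : PySem.List.index? k.toList c with _ | i
      · rw [PySem.List.index?_eq_none_iff] at h
        simp at hm
        exact absurd hm h
      · have hf : pvFirst k.toList c = (i : Int) + 1 := by unfold pvFirst; rw [h]
        have h0 : pvMerge 0 ((i : Int) + 1) = (i : Int) + 1 := by unfold pvMerge; split_ifs <;> omega
        have hcand : solBCand (k :: rest) c = ((i : Int) + 1) :: solBCand rest c := by
          rw [solBCand_cons, if_pos hm, h]; simp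
        unfold pvG pvB
        rw [List.foldl_cons, hf, h0, hcand, PySem.List.min?_id_cons]
        exact pv_fold_pos c rest ((i : Int) + 1) (by omega)
    · have h : PySem.List.index? k.toList c = none := by
        rw [PySem.List.index?_eq_none_iff]; simpa using hm
      have hf : pvFirst k.toList c = 0 := by unfold pvFirst; rw [h]
      have hcand : solBCand (k :: rest) c = solBCand rest c := by
        rw [solBCand_cons, if_neg hm, List.nil_append]
      unfold pvG pvB
      rw [List.foldl_cons, hf]
      have h0 : pvMerge 0 0 = 0 := by unfold pvMerge; simp
      rw [h0, hcand]
      exact ih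

theorem pv_aloop_map (data : PySem.Dict Char Int) (cs : List Char) :
    ∀ (js : List Int) (a : Int),
      solALoop data cs js a
        = solALoopCh data (js.map (fun j => PySem.List.pyGetD cs j ' ')) a := by
  intro js
  induction js with
  | nil => intro a; simp [solALoop, solALoopCh]
  | cons j rest ih =>
    intro a
    simp only [solALoop, solALoopCh, List.map_cons]
    split_ifs <;> simp_all

theorem pv_ch_eq_b (keymap : List String) (cs : List Char) :
    ∀ (total : Int), solALoopCh (solABuild keymap) cs total = solBLoop keymap cs total := by
  induction cs with
  | nil => intro total; simp [solALoopCh, solBLoop]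
  | cons c rest ih =>
    intro total
    have hv : (solABuild keymap).getD c 0 = pvB keymap c := by
      rw [pv_build, pv_G_eq_B]
    simp only [solALoopCh, solBLoop, hv]
    rcases h : PySem.List.min? (solBCand keymap c) (fun x => x) with _ | m
    · simp [pvB, h]
    · have hm : 1 ≤ m := pv_cand_pos keymap c m (PySem.List.min?_mem h)
      simp only [pvB, h]
      rw [if_neg (by omega)]
      exact ih _

theorem pv_bLoop_range (keymap : List String) (cs : List Char) :
    ∀ total, 0 ≤ total →
      solBLoop keymap cs total = -1 ∨
        (total ≤ solBLoop keymap cs total ∧ (0 < solBLoop keymap cs total ∨ cs = [])) := by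
  induction cs with
  | nil => intro total ht; right; exact ⟨le_refl _, Or.inr rfl⟩
  | cons c rest ih =>
    intro total ht
    simp only [solBLoop]
    rcases h : PySem.List.min? (solBCand keymap c) (fun x => x) with _ | m
    · simp only [h]; exact Or.inl trivial
    · simp only [h]
      have hm : 1 ≤ m := pv_cand_pos keymap c m (PySem.List.min?_mem h)
      rcases ih (total + m) (by omega) with h1 | ⟨h2, _⟩
      · left; exact h1
      · right; exact ⟨by omega, Or.inl (by omega)⟩

-- ===== VERDICT (by name: the statement is the Claim_ definition above) =====
theorem solution_spec : Claim_equal_solution := by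
  intro keymap targets _
  unfold Spec_solution
  simp only [solution, solution_alt]
  apply List.foldl_ext
  intro acc t _
  have h1 : solALoop (solABuild keymap) t.toList
      (PySem.List.pyRange 0 (PySem.Str.len t) 1) 0 = solBLoop keymap t.toList 0 := by
    rw [PySem.Str.len_eq, pv_aloop_map, PySem.List.map_pyGetD_pyRange_zero']
    exact pv_ch_eq_b keymap t.toList 0
  rcases pv_bLoop_range keymap t.toList 0 le_rfl with h | ⟨h2, h3⟩
  · rw [h1, h]; norm_num
  · rcases h3 with h3 | h3
    · rw [h1]
      rw [if_neg (by omega), if_pos (by omega)]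
    · rw [h1, h3]
      norm_num [solBLoop]
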